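-- pv_equiv track=rewrite | github.com/jearldean/AoC2023 | main.py | find_candidate_midlines_vert
-- ===== SOURCE A (Python) =====
-- def find_candidate_midlines_vert(puzzle_lines):
--     candidates = []
--     for col_idx in range(len(puzzle_lines[0]) - 1):
--         transformed_line1 = transform_a_line(puzzle_lines, col_idx)
--         transformed_line2 = transform_a_line(puzzle_lines, col_idx + 1)
--         if transformed_line1 == transformed_line2:
--             candidates.append([col_idx, col_idx + 1])
--     return candidates
--
-- def transform_a_line(puzzle_lines, col_idx):
--     transformed_line = ""
--     for line_idx in range(len(puzzle_lines)):
--         transformed_line += puzzle_lines[line_idx][col_idx]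
--     return transformed_line
-- ===== SOURCE B (Python) =====
-- def find_candidate_midlines_vert(puzzle_lines):
--     n = len(puzzle_lines[0]) - 1
--     ok = [True] * n
--     for line in puzzle_lines:
--         for col in range(n):
--             if line[col] != line[col + 1]:
--                 ok[col] = False
--     return [[col, col + 1] for col in range(n) if ok[col]]
-- ===== Notes on version B (the rewrite author's own statement) =====
-- stated objective: alternative
-- what changed: B never builds column strings at all: it sweeps the grid row by row, maintaining a boolean vector ok[col] of 'columns col and col+1 still identical', and emits the candidate pairs from that vector in a final pass, instead of A's column-major loop that materialises and compares two column strings per index.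
import Mathlib
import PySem

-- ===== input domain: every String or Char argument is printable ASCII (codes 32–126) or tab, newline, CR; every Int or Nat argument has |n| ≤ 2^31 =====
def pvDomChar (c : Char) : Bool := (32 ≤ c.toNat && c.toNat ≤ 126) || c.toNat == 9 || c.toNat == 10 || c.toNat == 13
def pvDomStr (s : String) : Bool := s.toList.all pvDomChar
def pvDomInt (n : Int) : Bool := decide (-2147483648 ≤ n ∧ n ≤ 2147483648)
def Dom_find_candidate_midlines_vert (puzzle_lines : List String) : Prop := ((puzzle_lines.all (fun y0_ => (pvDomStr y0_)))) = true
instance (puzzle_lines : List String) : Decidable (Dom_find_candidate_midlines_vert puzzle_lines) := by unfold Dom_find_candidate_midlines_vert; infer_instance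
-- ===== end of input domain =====

-- B replaces A's column-string construction with a row-by-row sweep maintaining a boolean vector
-- ok[col] = "columns col and col+1 still identical"; equivalence on Pre_ (both raise outside it).

-- ===== PORT A =====
-- growing Python string ported as a List Char accumulator (exact on the ASCII domain);
-- pyGetD's defaults are unreached under Pre_ (IndexError inputs are excluded there)
def transform_a_line (puzzle_lines : List String) (col_idx : Int) : List Char :=
  (PySem.List.pyRange 0 (PySem.List.len puzzle_lines) 1).foldl
    (fun acc line_idx =>
      acc ++ [PySem.List.pyGetD (PySem.List.pyGetD puzzle_lines line_idx "").toList col_idx ' '])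
    []

def find_candidate_midlines_vert (puzzle_lines : List String) : List (List Int) :=
  let w := PySem.List.len (PySem.List.pyGetD puzzle_lines 0 "").toList
  (PySem.List.pyRange 0 (w - 1) 1).foldl
    (fun candidates col_idx =>
      if transform_a_line puzzle_lines col_idx = transform_a_line puzzle_lines (col_idx + 1)
      then candidates ++ [[col_idx, col_idx + 1]] else candidates)
    []

-- ===== PORT B =====
-- B's inner loop over one row: 'for col in range(n): if line[col] != line[col+1]: ok[col] = False'
def alt_row_update (n : Int) (ok : List Bool) (line : String) : List Bool :=
  (PySem.List.pyRange 0 n 1).foldl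
    (fun ok col =>
      if PySem.List.pyGetD line.toList col ' ' ≠ PySem.List.pyGetD line.toList (col + 1) ' '
      then ok.set col.toNat false   -- ok[col] = False; col ≥ 0 inside the range, so toNat is exact
      else ok)
    ok

def find_candidate_midlines_vert_alt (puzzle_lines : List String) : List (List Int) :=
  let n : Int := PySem.List.len (PySem.List.pyGetD puzzle_lines 0 "").toList - 1
  let ok0 : List Bool := List.replicate n.toNat true   -- [True] * n  (empty when n ≤ 0, as in Python)
  let ok := puzzle_lines.foldl (alt_row_update n) ok0
  (PySem.List.pyRange 0 n 1).foldl
    (fun cands col =>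
      if PySem.List.pyGetD ok col false then cands ++ [[col, col + 1]] else cands)
    []

-- ===== PRECONDITION & SPEC =====
-- Exactly the inputs on which the Python A returns (B raises on the same inputs): a nonempty list
-- whose rows, when the first row has width ≥ 2, all reach that width; elsewhere an IndexError.
def Pre_find_candidate_midlines_vert (puzzle_lines : List String) : Prop :=
  puzzle_lines ≠ [] ∧
    (2 ≤ (puzzle_lines.headD "").toList.length →
      ∀ s ∈ puzzle_lines, (puzzle_lines.headD "").toList.length ≤ s.toList.length)
instance (puzzle_lines : List String) : Decidable (Pre_find_candidate_midlines_vert puzzle_lines) := by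
  unfold Pre_find_candidate_midlines_vert; infer_instance

def pvWitness_find_candidate_midlines_vert : List String := ["aab", "aab", "xxy"]

def Spec_find_candidate_midlines_vert (puzzle_lines : List String) (out : List (List Int)) : Prop := out = find_candidate_midlines_vert_alt puzzle_lines
instance (puzzle_lines : List String) (out : List (List Int)) : Decidable (Spec_find_candidate_midlines_vert puzzle_lines out) := by unfold Spec_find_candidate_midlines_vert; infer_instance

-- ===== CLAIM (what is proved, stated in full; the proofs are below) =====
def Claim_equal_find_candidate_midlines_vert : Prop := ∀ (puzzle_lines : List String), Dom_find_candidate_midlines_vert puzzle_lines → Pre_find_candidate_midlines_vert puzzle_lines → Spec_find_candidate_midlines_vert puzzle_lines (find_candidate_midlines_vert puzzle_lines)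

-- ===== LEMMAS AND PROOFS =====

-- "columns j and j+1 agree on this row": the condition both programs ultimately test
def goodAt (line : String) (j : Int) : Bool :=
  decide (PySem.List.pyGetD line.toList j ' ' = PySem.List.pyGetD line.toList (j + 1) ' ')

theorem alt_row_update_succ (k : Nat) (line : String) (ok : List Bool) :
    alt_row_update (↑(k + 1)) ok line =
      (if PySem.List.pyGetD line.toList (k : Int) ' ' ≠ PySem.List.pyGetD line.toList ((k : Int) + 1) ' '
       then (alt_row_update (k : Int) ok line).set k false else alt_row_update (k : Int) ok line) := by
  unfold alt_row_update
  have h : ((k + 1 : Nat) : Int) = (k : Int) + 1 := by push_cast; ring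
  rw [h, PySem.List.pyRange_one_succ_right (by positivity), List.foldl_concat]
  simp

theorem alt_row_update_length (k : Nat) (line : String) (ok : List Bool) :
    (alt_row_update (k : Int) ok line).length = ok.length := by
  induction k with
  | zero => unfold alt_row_update; rw [PySem.List.pyRange_one_eq_nil (by simp)]; rfl
  | succ k ih => rw [alt_row_update_succ]; split <;> simp [ih]

theorem alt_row_update_getElem? (k : Nat) (line : String) (ok : List Bool) (j : Nat) :
    (alt_row_update (k : Int) ok line)[j]? =
      if j < k then ok[j]?.map (fun v => v && goodAt line j) else ok[j]? := by
  induction k with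
  | zero => unfold alt_row_update; rw [PySem.List.pyRange_one_eq_nil (by simp)]; simp
  | succ k ih =>
    rw [alt_row_update_succ]
    by_cases hg : PySem.List.pyGetD line.toList (k : Int) ' ' = PySem.List.pyGetD line.toList ((k : Int) + 1) ' '
    · simp only [hg, ne_eq, not_true_eq_false, if_false, ih]
      by_cases hjk : j < k
      · simp [hjk, Nat.lt_succ_of_lt hjk]
      · by_cases hje : j = k
        · subst hje
          simp only [hjk, if_false, Nat.lt_succ_self, if_true]
          have : goodAt line (j : Int) = true := by unfold goodAt; exact decide_eq_true hg
          cases h : ok[j]? <;> simp [this]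
        · have : ¬ j < k + 1 := by omega
          simp [hjk, this]
    · simp only [hg, ne_eq, not_false_eq_true, if_true]
      rw [List.getElem?_set, alt_row_update_length]
      have hgood : goodAt line (k : Int) = false := by unfold goodAt; exact decide_eq_false hg
      by_cases hje : k = j
      · subst hje
        rw [if_pos rfl, if_pos (Nat.lt_succ_self k)]
        cases h : ok[k]? with
        | none =>
          have hk : ¬ k < ok.length := by simpa [List.getElem?_eq_none_iff] using h
          simp [hk]
        | some v =>
          have hk : k < ok.length := by
            by_contra hc
            rw [List.getElem?_eq_none_iff.2 (by omega)] at h; cases h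
          simp [hk, hgood]
      · rw [if_neg hje, ih]
        by_cases hjk : j < k
        · simp [hjk, Nat.lt_succ_of_lt hjk]
        · have h2 : ¬ j < k + 1 := by omega
          simp [hjk, h2]

theorem outer_getElem? (k : Nat) (L : List String) : ∀ (ok : List Bool) (j : Nat), j < k →
    (L.foldl (alt_row_update (k : Int)) ok)[j]? =
      ok[j]?.map (fun v => v && L.all (fun line => goodAt line j)) := by
  induction L with
  | nil => intro ok j hj; cases h : ok[j]? <;> simp [h]
  | cons l L ih =>
    intro ok j hj
    simp only [List.foldl_cons, List.all_cons]
    rw [ih _ j hj, alt_row_update_getElem?, if_pos hj]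
    cases h : ok[j]? <;> simp [Bool.and_assoc]

-- A's interleaved column rebuild is the map of the column projection over the rows
theorem transform_eq_map (puzzle_lines : List String) (c : Int) :
    transform_a_line puzzle_lines c
      = puzzle_lines.map (fun line => PySem.List.pyGetD line.toList c ' ') := by
  unfold transform_a_line
  rw [PySem.List.foldl_pyRange_zero_pyGetD puzzle_lines ""
    (fun acc line => acc ++ [PySem.List.pyGetD line.toList c ' ']) []]
  simpa using PySem.List.foldl_append_singleton_eq_map
    (f := fun line => PySem.List.pyGetD line.toList c ' ') (l := puzzle_lines) (acc := [])

-- both candidate loops over a common nonnegative width bound m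
theorem main_aux (pl : List String) (m : Nat) :
    (PySem.List.pyRange 0 (m : Int) 1).foldl
      (fun candidates col_idx =>
        if transform_a_line pl col_idx = transform_a_line pl (col_idx + 1)
        then candidates ++ [[col_idx, col_idx + 1]] else candidates) []
    = (PySem.List.pyRange 0 (m : Int) 1).foldl
      (fun cands col =>
        if PySem.List.pyGetD (pl.foldl (alt_row_update (m : Int)) (List.replicate m true)) col false
        then cands ++ [[col, col + 1]] else cands) [] := by
  apply PySem.List.foldl_congr_mem
  intro acc col hcol
  obtain ⟨h0, hlt⟩ := PySem.List.mem_pyRange_one.1 hcol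
  have hj : ((col.toNat : Nat) : Int) = col := Int.toNat_of_nonneg h0
  have hjm : col.toNat < m := by omega
  have hB : PySem.List.pyGetD (pl.foldl (alt_row_update (m : Int)) (List.replicate m true)) col false
      = pl.all (fun line => goodAt line col) := by
    rw [PySem.List.pyGetD_of_nonneg _ _ h0, List.getD_eq_getElem?_getD,
      outer_getElem? m pl _ col.toNat hjm]
    simp [hjm, hj]
  have hcond : (transform_a_line pl col = transform_a_line pl (col + 1))
      ↔ (PySem.List.pyGetD (pl.foldl (alt_row_update (m : Int)) (List.replicate m true)) col false = true) := by
    rw [hB, transform_eq_map, transform_eq_map, List.map_inj_left, List.all_eq_true]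
    unfold goodAt
    simp
  simp only [hcond]

-- ===== VERDICT (by name: the statement is the Claim_ definition above) =====
theorem find_candidate_midlines_vert_spec : Claim_equal_find_candidate_midlines_vert := by
  intro pl _ _
  show find_candidate_midlines_vert pl = find_candidate_midlines_vert_alt pl
  simp only [find_candidate_midlines_vert, find_candidate_midlines_vert_alt]
  by_cases hpos : PySem.List.len (PySem.List.pyGetD pl 0 "").toList - 1 ≤ 0
  · rw [PySem.List.pyRange_one_eq_nil hpos]
    rfl
  · have hm : PySem.List.len (PySem.List.pyGetD pl 0 "").toList - 1
        = (((PySem.List.len (PySem.List.pyGetD pl 0 "").toList - 1).toNat : Nat) : Int) := by omega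
    rw [hm]
    simpa using main_aux pl (PySem.List.len (PySem.List.pyGetD pl 0 "").toList - 1).toNat
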